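-- pv_equiv track=rewrite | github.com/Dilmith-Anusara/ST_3011_Individual_Extension | pages/2_Modeling.py | variable_label
-- ===== SOURCE A (Python) =====
-- def variable_label(var_name):
--     mapping = {
--         "Intercept":      "Intercept",
--         "age":            "Vehicle age",
--         "log_engine_cc":  "Engine capacity",
--         "leasing":        "Leasing available",
--         "power_steering": "Power steering",
--         "power_mirror":   "Power mirror",
--         "power_window":   "Power window",
--     }
--     if var_name in mapping:
--         return mapping[var_name]
--     for prefix, label in [
--         ("C(gear)[T.",         "Transmission"),
--         ("C(province)[T.",     "Province"),
--         ("C(brand_segment)[T.","Brand segment"),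
--         ("C(fuel_segment)[T.", "Fuel segment"),
--     ]:
--         if var_name.startswith(prefix):
--             level = var_name[len(prefix):].rstrip("]")
--             return f"{label}: {level}"
--     return var_name
-- ===== SOURCE B (Python) =====
-- def variable_label(var_name):
--     exact = {
--         "Intercept":      "Intercept",
--         "age":            "Vehicle age",
--         "log_engine_cc":  "Engine capacity",
--         "leasing":        "Leasing available",
--         "power_steering": "Power steering",
--         "power_mirror":   "Power mirror",
--         "power_window":   "Power window",
--     }
--     if var_name in exact:
--         return exact[var_name]
--     cols = {
--         "gear":          "Transmission",
--         "province":      "Province",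
--         "brand_segment": "Brand segment",
--         "fuel_segment":  "Fuel segment",
--     }
--     if var_name.startswith("C("):
--         body = var_name[2:]
--         i = body.find(")[T.")
--         if i >= 0:
--             label = cols.get(body[:i])
--             if label is not None:
--                 return f"{label}: {body[i + 4:].rstrip(']')}"
--     return var_name
-- ===== Notes on version B (the rewrite author's own statement) =====
-- stated objective: alternative
-- what changed: Replaces the four-prefix startswith loop by a single structural parse: strip 'C(', find the first ')[T.' separator once, and look the captured column name up in a small column->label dict.
import Mathlib
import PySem

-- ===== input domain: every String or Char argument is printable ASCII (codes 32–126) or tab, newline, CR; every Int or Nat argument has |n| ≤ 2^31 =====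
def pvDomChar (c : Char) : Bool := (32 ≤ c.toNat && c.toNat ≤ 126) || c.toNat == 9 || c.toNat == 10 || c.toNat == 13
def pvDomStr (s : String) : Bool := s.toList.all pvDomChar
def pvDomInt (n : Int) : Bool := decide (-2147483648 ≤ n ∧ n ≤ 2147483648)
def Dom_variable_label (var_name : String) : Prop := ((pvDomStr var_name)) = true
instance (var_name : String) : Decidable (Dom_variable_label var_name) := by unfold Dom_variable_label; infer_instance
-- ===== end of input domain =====

-- B parses the term structure once (strip "C(", find the first ")[T.", dict lookup on the
-- captured column) instead of A's four-prefix startswith loop; same return value everywhere.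

-- shared data: the exact-match dict (identical literal in Source A and Source B)
def vlExact : PySem.Dict String String :=
  ((((((PySem.Dict.empty.insert "Intercept" "Intercept").insert "age" "Vehicle age").insert
      "log_engine_cc" "Engine capacity").insert "leasing" "Leasing available").insert
      "power_steering" "Power steering").insert "power_mirror" "Power mirror").insert
      "power_window" "Power window"

-- shared helper: s.rstrip("]") — drop all trailing ']' (exact port of str.rstrip with chars = "]")
def pvRstripBr (s : String) : String :=
  String.ofList ((s.toList.reverse.dropWhile (· == ']')).reverse)

-- ===== PORT A =====
-- the for-loop over the four (prefix, label) pairs, first match wins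
def vlLoopA : List (String × String) → String → String
  | [], s => s
  | (p, l) :: rest, s =>
    if PySem.Str.startswith s p then
      l ++ ": " ++ pvRstripBr (PySem.Str.slice s (some (PySem.Str.len p)) none)
    else vlLoopA rest s

def variable_label (var_name : String) : String :=
  match vlExact.get? var_name with
  | some v => v
  | none =>
    vlLoopA
      [("C(gear)[T.", "Transmission"), ("C(province)[T.", "Province"),
       ("C(brand_segment)[T.", "Brand segment"), ("C(fuel_segment)[T.", "Fuel segment")]
      var_name

-- ===== PORT B =====
def vlCols : PySem.Dict String String :=
  (((PySem.Dict.empty.insert "gear" "Transmission").insert "province" "Province").insert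
      "brand_segment" "Brand segment").insert "fuel_segment" "Fuel segment"

def variable_label_alt (var_name : String) : String :=
  match vlExact.get? var_name with
  | some v => v
  | none =>
    if PySem.Str.startswith var_name "C(" then
      let body := PySem.Str.slice var_name (some 2) none     -- body = var_name[2:]
      let i := PySem.Str.find body ")[T."                    -- i = body.find(")[T.")
      if 0 ≤ i then
        match vlCols.get? (PySem.Str.slice body none (some i)) with  -- cols.get(body[:i])
        | some label =>
            label ++ ": " ++ pvRstripBr (PySem.Str.slice body (some (i + 4)) none)
        | none => var_name
      else var_name
    else var_name

-- ===== PRECONDITION & SPEC =====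
def Spec_variable_label (var_name : String) (out : String) : Prop := out = variable_label_alt var_name
instance (var_name : String) (out : String) : Decidable (Spec_variable_label var_name out) := by unfold Spec_variable_label; infer_instance

-- ===== CLAIM (what is proved, stated in full; the proofs are below) =====
def Claim_equal_variable_label : Prop := ∀ (var_name : String), Dom_variable_label var_name → Spec_variable_label var_name (variable_label var_name)

-- ===== LEMMAS AND PROOFS =====

-- the separator ")[T." as a char list
def vlSep : List Char := [')', '[', 'T', '.']

-- the first occurrence of ")[T." after a ')'-free block w is at index w.length
theorem find_of_decomp (w t body : List Char) (hw : ')' ∉ w)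
    (h : body = w ++ (vlSep ++ t)) :
    PySem.Chars.find body vlSep = (w.length : Int) := by
  have h0 : 0 ≤ PySem.Chars.find body vlSep := by
    rw [PySem.Chars.find_nonneg_iff]
    exact ⟨w, t, by rw [h, List.append_assoc]⟩
  obtain ⟨hpre, hmin⟩ := PySem.Chars.find_spec h0
  set n := (PySem.Chars.find body vlSep).toNat with hn
  have hle : n ≤ w.length := by
    by_contra hlt
    push Not at hlt
    exact hmin w.length hlt ⟨t, by rw [h, List.drop_left]⟩
  have hge : w.length ≤ n := by
    by_contra hlt
    push Not at hlt
    obtain ⟨u, hu⟩ := hpre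
    have hbn : body[n]? = some ')' := by
      have h1 : (body.drop n)[0]? = some ')' := by rw [← hu]; rfl
      rwa [List.getElem?_drop, Nat.add_zero] at h1
    have hwn : body[n]? = w[n]? := by
      rw [h, List.getElem?_append_left hlt]
    have : w[n]? = some ')' := by rw [← hwn, hbn]
    exact hw (List.mem_of_getElem? this)
  have hn' : n = w.length := le_antisymm hle hge
  omega

-- a positive find decomposes body as prefix ++ ")[T." ++ rest
theorem decomp_of_find (body : List Char) (h : 0 ≤ PySem.Chars.find body vlSep) :
    body = body.take (PySem.Chars.find body vlSep).toNat ++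
           (vlSep ++ body.drop ((PySem.Chars.find body vlSep).toNat + 4)) := by
  obtain ⟨u, hu⟩ := (PySem.Chars.find_spec h).1
  have h4 : body.drop ((PySem.Chars.find body vlSep).toNat + 4) = u := by
    rw [← List.drop_drop, ← hu]
    simp [vlSep]
  rw [h4, hu, List.take_append_drop]

-- startswith on a "C(<w>)[T." prefix, spelled as a decomposition of s
theorem sw_iff (s : String) (w : List Char) (p : String)
    (hp : p.toList = 'C' :: '(' :: (w ++ vlSep)) :
    PySem.Str.startswith s p = true ↔ ∃ t, s.toList = 'C' :: '(' :: (w ++ (vlSep ++ t)) := by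
  rw [PySem.Str.startswith_eq, PySem.Chars.startswith_iff, hp]
  constructor
  · rintro ⟨t, ht⟩; exact ⟨t, by rw [← ht]; simp⟩
  · rintro ⟨t, ht⟩; exact ⟨t, by rw [ht]; simp⟩

-- under 0 ≤ find, a column prefix matches exactly when the captured column equals it
theorem sw_eq_col (s : String) (body : List Char) (hsl : s.toList = 'C' :: '(' :: body)
    (hge : 0 ≤ PySem.Chars.find body vlSep) (w : List Char) (hw : ')' ∉ w) (p : String)
    (hp : p.toList = 'C' :: '(' :: (w ++ vlSep)) :
    PySem.Str.startswith s p = true ↔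
      body.take (PySem.Chars.find body vlSep).toNat = w := by
  constructor
  · intro h
    obtain ⟨t, ht⟩ := (sw_iff s w p hp).1 h
    rw [hsl] at ht
    simp only [List.cons.injEq, true_and] at ht
    rw [find_of_decomp w t body hw ht, Int.toNat_natCast, ht, List.take_left]
  · intro hcol
    refine (sw_iff s w p hp).2 ⟨body.drop ((PySem.Chars.find body vlSep).toNat + 4), ?_⟩
    rw [hsl]
    conv_lhs => rw [decomp_of_find body hge]
    rw [hcol]

-- no separator in body: no column prefix matches
theorem sw_false_nofind (s : String) (body : List Char) (hsl : s.toList = 'C' :: '(' :: body)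
    (hneg : PySem.Chars.find body vlSep = -1) (w : List Char) (p : String)
    (hp : p.toList = 'C' :: '(' :: (w ++ vlSep)) :
    PySem.Str.startswith s p = false := by
  rw [Bool.eq_false_iff]
  intro h
  obtain ⟨t, ht⟩ := (sw_iff s w p hp).1 h
  rw [hsl] at ht
  simp only [List.cons.injEq, true_and] at ht
  have : vlSep <:+: body := ⟨w, t, by rw [ht, List.append_assoc]⟩
  rw [PySem.Chars.find_eq_neg_one_iff] at hneg
  exact hneg this

-- not starting with "C(": no column prefix matches
theorem sw_false_noC (s : String) (hC : ¬ PySem.Str.startswith s "C(" = true)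
    (w : List Char) (p : String) (hp : p.toList = 'C' :: '(' :: (w ++ vlSep)) :
    PySem.Str.startswith s p = false := by
  rw [Bool.eq_false_iff]
  intro h
  rw [PySem.Str.startswith_eq, PySem.Chars.startswith_iff, hp] at h
  obtain ⟨t, ht⟩ := h
  apply hC
  rw [PySem.Str.startswith_eq, PySem.Chars.startswith_iff]
  exact ⟨w ++ vlSep ++ t, by rw [← ht]; rfl⟩

-- toList-congruence for the shared rstrip helper
theorem pvRstripBr_congr (a b : String) (h : a.toList = b.toList) : pvRstripBr a = pvRstripBr b := by
  unfold pvRstripBr; rw [h]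

theorem col_case (s : String) (body : List Char) (hsl : s.toList = 'C' :: '(' :: body)
    (hge : 0 ≤ PySem.Chars.find body vlSep)
    (w : List Char) (hw : ')' ∉ w) (p : String) (hp : p.toList = 'C' :: '(' :: (w ++ vlSep))
    (hcol : body.take (PySem.Chars.find body vlSep).toNat = w) :
    (PySem.Str.slice s (some (PySem.Str.len p)) none).toList =
    (PySem.Str.slice (PySem.Str.slice s (some 2) none)
        (some (PySem.Chars.find body vlSep + 4)) none).toList := by
  have hbody : (PySem.Str.slice s (some 2) none).toList = body := by
    rw [PySem.Str.toList_slice, PySem.Chars.slice_eq_listSlice,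
        PySem.List.slice_from _ (by norm_num : (0:Int) ≤ 2), hsl]
    rfl
  have hfw : PySem.Chars.find body vlSep = (w.length : Int) := by
    refine find_of_decomp w (body.drop ((PySem.Chars.find body vlSep).toNat + 4)) body hw ?_
    conv_lhs => rw [decomp_of_find body hge]
    rw [hcol]
  have hlen : PySem.Str.len p = w.length + 6 := by
    rw [PySem.Str.len_eq, hp]
    simp [vlSep]
    omega
  rw [PySem.Str.toList_slice, PySem.Chars.slice_eq_listSlice, hlen,
      (by push_cast; ring : ((w.length : Int) + 6) = ((w.length + 6 : Nat) : Int)),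
      PySem.List.slice_from_natCast, hsl,
      PySem.Str.toList_slice, PySem.Chars.slice_eq_listSlice,
      PySem.List.slice_from _ (by omega : (0:Int) ≤ PySem.Chars.find body vlSep + 4), hbody, hfw]
  have h1 : ((w.length : Int) + 4).toNat = w.length + 4 := by omega
  rw [h1]
  have h2 : w.length + 6 = (w.length + 4) + 2 := by omega
  rw [h2]
  rfl

theorem main_eq (s : String) : variable_label s = variable_label_alt s := by
  unfold variable_label variable_label_alt
  cases vlExact.get? s with
  | some v => rfl
  | none =>
    by_cases hC : PySem.Str.startswith s "C(" = true
    case neg =>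
      rw [vlLoopA, vlLoopA, vlLoopA, vlLoopA, vlLoopA,
          if_neg (by rw [sw_false_noC s hC "gear".toList _ (by decide)]; decide),
          if_neg (by rw [sw_false_noC s hC "province".toList _ (by decide)]; decide),
          if_neg (by rw [sw_false_noC s hC "brand_segment".toList _ (by decide)]; decide),
          if_neg (by rw [sw_false_noC s hC "fuel_segment".toList _ (by decide)]; decide),
          if_neg (by rw [Bool.not_eq_true] at hC; rw [hC]; decide)]
    case pos =>
      have hsl : s.toList = 'C' :: '(' :: s.toList.drop 2 := by
        rw [PySem.Str.startswith_eq, PySem.Chars.startswith_iff] at hC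
        obtain ⟨t, ht⟩ := hC
        rw [← ht]
        rfl
      set body := s.toList.drop 2 with hbdef
      rw [if_pos hC]
      dsimp only
      have hbody : (PySem.Str.slice s (some 2) none).toList = body := by
        rw [PySem.Str.toList_slice, PySem.Chars.slice_eq_listSlice,
            PySem.List.slice_from _ (by norm_num : (0:Int) ≤ 2)]
        rfl
      have hfind : PySem.Str.find (PySem.Str.slice s (some 2) none) ")[T."
          = PySem.Chars.find body vlSep := by
        rw [PySem.Str.find_eq, hbody, (by decide : (")[T." : String).toList = vlSep)]
      rw [hfind]
      by_cases hge : 0 ≤ PySem.Chars.find body vlSep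
      case neg =>
        have hneg : PySem.Chars.find body vlSep = -1 := by
          have := PySem.Chars.neg_one_le_find body vlSep
          omega
        rw [vlLoopA, if_neg (by rw [sw_false_nofind s body hsl hneg "gear".toList _ (by decide)]; decide),
            vlLoopA, if_neg (by rw [sw_false_nofind s body hsl hneg "province".toList _ (by decide)]; decide),
            vlLoopA, if_neg (by rw [sw_false_nofind s body hsl hneg "brand_segment".toList _ (by decide)]; decide),
            vlLoopA, if_neg (by rw [sw_false_nofind s body hsl hneg "fuel_segment".toList _ (by decide)]; decide),
            vlLoopA, if_neg hge]
      case pos =>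
        rw [if_pos hge]
        have hkey : (PySem.Str.slice (PySem.Str.slice s (some 2) none) none
            (some (PySem.Chars.find body vlSep))).toList
            = body.take (PySem.Chars.find body vlSep).toNat := by
          rw [PySem.Str.toList_slice, PySem.Chars.slice_eq_listSlice, hbody,
              PySem.List.slice_to _ hge]
        by_cases h1 : body.take (PySem.Chars.find body vlSep).toNat = "gear".toList
        · -- column gear
          rw [vlLoopA, if_pos ((sw_eq_col s body hsl hge "gear".toList (by decide) "C(gear)[T." (by decide)).2 h1)]
          have hkeq : PySem.Str.slice (PySem.Str.slice s (some 2) none) none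
              (some (PySem.Chars.find body vlSep)) = "gear" :=
            String.toList_inj.mp (by rw [hkey, h1])
          rw [hkeq, (by rfl : vlCols.get? "gear" = some "Transmission")]
          rw [pvRstripBr_congr _ _ (col_case s body hsl hge "gear".toList (by decide) "C(gear)[T." (by decide) h1)]
        by_cases h2 : body.take (PySem.Chars.find body vlSep).toNat = "province".toList
        · -- column province
          rw [vlLoopA, if_neg (fun hh => h1 ((sw_eq_col s body hsl hge "gear".toList (by decide) "C(gear)[T." (by decide)).1 hh))]
          rw [vlLoopA, if_pos ((sw_eq_col s body hsl hge "province".toList (by decide) "C(province)[T." (by decide)).2 h2)]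
          have hkeq : PySem.Str.slice (PySem.Str.slice s (some 2) none) none
              (some (PySem.Chars.find body vlSep)) = "province" :=
            String.toList_inj.mp (by rw [hkey, h2])
          rw [hkeq, (by rfl : vlCols.get? "province" = some "Province")]
          rw [pvRstripBr_congr _ _ (col_case s body hsl hge "province".toList (by decide) "C(province)[T." (by decide) h2)]
        by_cases h3 : body.take (PySem.Chars.find body vlSep).toNat = "brand_segment".toList
        · -- column brand_segment
          rw [vlLoopA, if_neg (fun hh => h1 ((sw_eq_col s body hsl hge "gear".toList (by decide) "C(gear)[T." (by decide)).1 hh))]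
          rw [vlLoopA, if_neg (fun hh => h2 ((sw_eq_col s body hsl hge "province".toList (by decide) "C(province)[T." (by decide)).1 hh))]
          rw [vlLoopA, if_pos ((sw_eq_col s body hsl hge "brand_segment".toList (by decide) "C(brand_segment)[T." (by decide)).2 h3)]
          have hkeq : PySem.Str.slice (PySem.Str.slice s (some 2) none) none
              (some (PySem.Chars.find body vlSep)) = "brand_segment" :=
            String.toList_inj.mp (by rw [hkey, h3])
          rw [hkeq, (by rfl : vlCols.get? "brand_segment" = some "Brand segment")]
          rw [pvRstripBr_congr _ _ (col_case s body hsl hge "brand_segment".toList (by decide) "C(brand_segment)[T." (by decide) h3)]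
        by_cases h4 : body.take (PySem.Chars.find body vlSep).toNat = "fuel_segment".toList
        · -- column fuel_segment
          rw [vlLoopA, if_neg (fun hh => h1 ((sw_eq_col s body hsl hge "gear".toList (by decide) "C(gear)[T." (by decide)).1 hh))]
          rw [vlLoopA, if_neg (fun hh => h2 ((sw_eq_col s body hsl hge "province".toList (by decide) "C(province)[T." (by decide)).1 hh))]
          rw [vlLoopA, if_neg (fun hh => h3 ((sw_eq_col s body hsl hge "brand_segment".toList (by decide) "C(brand_segment)[T." (by decide)).1 hh))]
          rw [vlLoopA, if_pos ((sw_eq_col s body hsl hge "fuel_segment".toList (by decide) "C(fuel_segment)[T." (by decide)).2 h4)]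
          have hkeq : PySem.Str.slice (PySem.Str.slice s (some 2) none) none
              (some (PySem.Chars.find body vlSep)) = "fuel_segment" :=
            String.toList_inj.mp (by rw [hkey, h4])
          rw [hkeq, (by rfl : vlCols.get? "fuel_segment" = some "Fuel segment")]
          rw [pvRstripBr_congr _ _ (col_case s body hsl hge "fuel_segment".toList (by decide) "C(fuel_segment)[T." (by decide) h4)]
        -- no known column
        rw [vlLoopA, if_neg (fun hh => h1 ((sw_eq_col s body hsl hge "gear".toList (by decide) "C(gear)[T." (by decide)).1 hh))]
        rw [vlLoopA, if_neg (fun hh => h2 ((sw_eq_col s body hsl hge "province".toList (by decide) "C(province)[T." (by decide)).1 hh))]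
        rw [vlLoopA, if_neg (fun hh => h3 ((sw_eq_col s body hsl hge "brand_segment".toList (by decide) "C(brand_segment)[T." (by decide)).1 hh))]
        rw [vlLoopA, if_neg (fun hh => h4 ((sw_eq_col s body hsl hge "fuel_segment".toList (by decide) "C(fuel_segment)[T." (by decide)).1 hh))]
        rw [vlLoopA]
        have k1 : PySem.Str.slice (PySem.Str.slice s (some 2) none) none
            (some (PySem.Chars.find body vlSep)) ≠ "gear" :=
          fun h => h1 (by rw [← hkey, h])
        have k2 : PySem.Str.slice (PySem.Str.slice s (some 2) none) none
            (some (PySem.Chars.find body vlSep)) ≠ "province" :=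
          fun h => h2 (by rw [← hkey, h])
        have k3 : PySem.Str.slice (PySem.Str.slice s (some 2) none) none
            (some (PySem.Chars.find body vlSep)) ≠ "brand_segment" :=
          fun h => h3 (by rw [← hkey, h])
        have k4 : PySem.Str.slice (PySem.Str.slice s (some 2) none) none
            (some (PySem.Chars.find body vlSep)) ≠ "fuel_segment" :=
          fun h => h4 (by rw [← hkey, h])
        rw [(by
          rw [vlCols, PySem.Dict.get?_insert_of_ne _ _ k4, PySem.Dict.get?_insert_of_ne _ _ k3,
              PySem.Dict.get?_insert_of_ne _ _ k2, PySem.Dict.get?_insert_of_ne _ _ k1]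
          exact PySem.Dict.get?_empty _ : vlCols.get? (PySem.Str.slice (PySem.Str.slice s (some 2) none) none
            (some (PySem.Chars.find body vlSep))) = none)]

-- ===== VERDICT (by name: the statement is the Claim_ definition above) =====
theorem variable_label_spec : Claim_equal_variable_label := by
  intro v _
  exact main_eq v
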